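-- pv_equiv track=rewrite | github.com/annaulazar/algorithms_practice | Trenirovka_6_0/lecture_3/task_g-stress.py | sum_time_in_pvz
-- ===== SOURCE A (Python) =====
-- from collections import deque
--
-- def sum_time_in_pvz(minutes: int, cnt_by_minute: int, arr: list[int]) -> int:
--     res = 0
--     que = deque()
--     for minute in range(minutes):
--         cnt = cnt_by_minute
--         while que and cnt > 0:
--             if que[0][0] <= cnt:
--                 from_que = que.popleft()
--                 cnt -= from_que[0]
--                 res += from_que[0] * (minute - from_que[1] + 1)
--             else:
--                 que[0][0] -= cnt
--                 res += cnt * (minute - que[0][1] + 1)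
--                 cnt = 0
--         current = arr[minute]
--         if current > cnt:
--             current -= cnt
--             res += cnt
--             que.append([current, minute])
--         else:
--             res += current
--     for ost in que:
--         res += ost[0] * (minutes - ost[1] + 1)
--
--     return res
-- ===== SOURCE B (Python) =====
-- def sum_time_in_pvz(minutes: int, cnt_by_minute: int, arr: list[int]) -> int:
--     # total waiting time = sum over minutes of items present; queue kept as one counter
--     res = 0
--     q = 0
--     for minute in range(minutes):
--         res += q
--         served = min(q, cnt_by_minute) if cnt_by_minute > 0 else 0
--         cnt = cnt_by_minute - served
--         q -= served
--         current = arr[minute]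
--         res += current
--         if current > cnt:
--             q += current - cnt
--     return res + q
-- ===== Notes on version B (the rewrite author's own statement) =====
-- stated objective: simpler
-- what changed: Replaced the deque of [count, arrival-minute] pairs and its inner while-loop by a single queued-items counter, using the identity total-waiting-time = sum over minutes of items present.
import Mathlib
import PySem

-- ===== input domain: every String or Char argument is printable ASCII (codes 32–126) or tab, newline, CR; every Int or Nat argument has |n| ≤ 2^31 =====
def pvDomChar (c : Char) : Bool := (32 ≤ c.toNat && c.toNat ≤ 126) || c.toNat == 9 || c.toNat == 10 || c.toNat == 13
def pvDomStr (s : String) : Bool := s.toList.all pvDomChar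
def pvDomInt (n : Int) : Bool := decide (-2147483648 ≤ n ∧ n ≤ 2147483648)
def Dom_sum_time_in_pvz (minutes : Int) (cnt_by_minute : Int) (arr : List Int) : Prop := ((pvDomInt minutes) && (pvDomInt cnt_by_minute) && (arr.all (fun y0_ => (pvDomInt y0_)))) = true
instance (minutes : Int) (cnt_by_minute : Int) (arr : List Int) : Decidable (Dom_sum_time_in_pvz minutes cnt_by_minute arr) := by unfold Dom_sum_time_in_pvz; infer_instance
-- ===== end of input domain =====

-- B replaces A's deque of [count, arrival-minute] pairs by a single queued-items counter,
-- using total-waiting-time = sum over minutes of items present (objective: simpler).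

-- ===== PORT A =====
-- the inner 'while que and cnt > 0' loop of A (structural recursion on the deque)
def serveA : List (Int × Int) → Int → Int → Int → List (Int × Int) × Int × Int
  | [], cnt, res, _ => ([], cnt, res)
  | (c, t) :: rest, cnt, res, minute =>
    if cnt > 0 then
      if c ≤ cnt then serveA rest (cnt - c) (res + c * (minute - t + 1)) minute
      else ((c - cnt, t) :: rest, 0, res + cnt * (minute - t + 1))
    else ((c, t) :: rest, cnt, res)

-- one iteration of A's 'for minute in range(minutes)' body; state = (res, que)
def stepA (cnt_by_minute : Int) (arr : List Int) (st : Int × List (Int × Int)) (minute : Int) :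
    Int × List (Int × Int) :=
  let r := serveA st.2 cnt_by_minute st.1 minute
  let current := (PySem.List.pyGet? arr minute).getD 0   -- arr[minute]; Pre_ keeps it in range
  if current > r.2.1 then (r.2.2 + r.2.1, r.1 ++ [(current - r.2.1, minute)])
  else (r.2.2 + current, r.1)

def sum_time_in_pvz (minutes : Int) (cnt_by_minute : Int) (arr : List Int) : Int :=
  let st := (PySem.List.pyRange 0 minutes 1).foldl (stepA cnt_by_minute arr) (0, [])
  st.2.foldl (fun r ct => r + ct.1 * (minutes - ct.2 + 1)) st.1

-- ===== PORT B =====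
-- one iteration of B's loop body; state = (res, q)
def stepB (cnt_by_minute : Int) (arr : List Int) (st : Int × Int) (minute : Int) : Int × Int :=
  let res := st.1 + st.2
  let served := if cnt_by_minute > 0 then min st.2 cnt_by_minute else 0
  let cnt := cnt_by_minute - served
  let q := st.2 - served
  let current := (PySem.List.pyGet? arr minute).getD 0   -- arr[minute]; Pre_ keeps it in range
  if current > cnt then (res + current, q + (current - cnt)) else (res + current, q)

def sum_time_in_pvz_alt (minutes : Int) (cnt_by_minute : Int) (arr : List Int) : Int :=
  let st := (PySem.List.pyRange 0 minutes 1).foldl (stepB cnt_by_minute arr) (0, 0)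
  st.1 + st.2

-- ===== PRECONDITION & SPEC =====
-- A raises IndexError on arr[minute] when minutes exceeds len(arr); otherwise A is total.
def Pre_sum_time_in_pvz (minutes : Int) (cnt_by_minute : Int) (arr : List Int) : Prop :=
  minutes ≤ (arr.length : Int)
instance (minutes : Int) (cnt_by_minute : Int) (arr : List Int) : Decidable (Pre_sum_time_in_pvz minutes cnt_by_minute arr) := by unfold Pre_sum_time_in_pvz; infer_instance
def pvWitness_sum_time_in_pvz : Int × Int × List Int := (3, 2, [5, 0, 3])
def Spec_sum_time_in_pvz (minutes : Int) (cnt_by_minute : Int) (arr : List Int) (out : Int) : Prop := out = sum_time_in_pvz_alt minutes cnt_by_minute arr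
instance (minutes : Int) (cnt_by_minute : Int) (arr : List Int) (out : Int) : Decidable (Spec_sum_time_in_pvz minutes cnt_by_minute arr out) := by unfold Spec_sum_time_in_pvz; infer_instance

-- ===== CLAIM (what is proved, stated in full; the proofs are below) =====
def Claim_equal_sum_time_in_pvz : Prop := ∀ (minutes : Int) (cnt_by_minute : Int) (arr : List Int), Dom_sum_time_in_pvz minutes cnt_by_minute arr → Pre_sum_time_in_pvz minutes cnt_by_minute arr → Spec_sum_time_in_pvz minutes cnt_by_minute arr (sum_time_in_pvz minutes cnt_by_minute arr)

-- ===== LEMMAS AND PROOFS =====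

-- total items queued / their accumulated waiting up to minute m
def queSum (que : List (Int × Int)) : Int := (que.map Prod.fst).sum
def pot (m : Int) (que : List (Int × Int)) : Int := (que.map (fun ct => ct.1 * (m - ct.2))).sum

lemma queSum_nonneg (que : List (Int × Int)) (hpos : ∀ p ∈ que, 0 < p.1) : 0 ≤ queSum que := by
  induction que with
  | nil => simp [queSum]
  | cons p rest ih =>
    have h1 := hpos p (by simp)
    have h2 := ih (fun q hq => hpos q (by simp [hq]))
    simp only [queSum, List.map_cons, List.sum_cons] at *
    omega

lemma pot_succ (m : Int) (que : List (Int × Int)) :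
    pot (m + 1) que = pot m que + queSum que := by
  induction que with
  | nil => simp [pot, queSum]
  | cons p rest ih =>
    simp only [pot, queSum, List.map_cons, List.sum_cons] at *
    have : p.1 * (m + 1 - p.2) = p.1 * (m - p.2) + p.1 := by ring
    omega

lemma pot_append (m : Int) (l : List (Int × Int)) (x : Int × Int) :
    pot m (l ++ [x]) = pot m l + x.1 * (m - x.2) := by
  simp [pot]

lemma queSum_append (l : List (Int × Int)) (x : Int × Int) :
    queSum (l ++ [x]) = queSum l + x.1 := by
  simp [queSum]

lemma pot_final (M : Int) (que : List (Int × Int)) :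
    (que.map (fun ct => ct.1 * (M - ct.2 + 1))).sum = pot M que + queSum que := by
  induction que with
  | nil => simp [pot, queSum]
  | cons p rest ih =>
    simp only [pot, queSum, List.map_cons, List.sum_cons] at *
    have : p.1 * (M - p.2 + 1) = p.1 * (M - p.2) + p.1 := by ring
    omega

lemma serveA_spec (que : List (Int × Int)) (cnt res minute : Int)
    (hpos : ∀ p ∈ que, 0 < p.1) :
    (∀ p ∈ (serveA que cnt res minute).1, 0 < p.1) ∧
    queSum (serveA que cnt res minute).1
      = queSum que - (if 0 < cnt then min (queSum que) cnt else 0) ∧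
    (serveA que cnt res minute).2.1
      = cnt - (if 0 < cnt then min (queSum que) cnt else 0) ∧
    (serveA que cnt res minute).2.2 + pot minute (serveA que cnt res minute).1
      = res + pot minute que + (if 0 < cnt then min (queSum que) cnt else 0) := by
  induction que generalizing cnt res with
  | nil => simp [serveA, queSum, pot]; omega
  | cons p rest ih =>
    obtain ⟨c, t⟩ := p
    have hc : 0 < c := hpos (c, t) (by simp)
    have hposr : ∀ p ∈ rest, 0 < p.1 := fun q hq => hpos q (by simp [hq])
    have hSr : 0 ≤ queSum rest := queSum_nonneg rest hposr
    by_cases hcnt : cnt > 0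
    · by_cases hle : c ≤ cnt
      · have heq : serveA ((c, t) :: rest) cnt res minute
            = serveA rest (cnt - c) (res + c * (minute - t + 1)) minute := by
          simp [serveA, hcnt, hle]
        obtain ⟨i1, i2, i3, i4⟩ := ih (cnt - c) (res + c * (minute - t + 1)) hposr
        rw [heq]
        have hmul : c * (minute - t + 1) = c * (minute - t) + c := by ring
        simp only [queSum, pot, List.map_cons, List.sum_cons] at i2 i3 i4 hSr ⊢
        refine ⟨i1, ?_, ?_, ?_⟩ <;> omega
      · have heq : serveA ((c, t) :: rest) cnt res minute
            = ((c - cnt, t) :: rest, 0, res + cnt * (minute - t + 1)) := by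
          simp [serveA, hcnt, hle]
        rw [heq]
        refine ⟨?_, ?_, ?_, ?_⟩
        · intro p hp
          rcases List.mem_cons.mp hp with h | h
          · subst h; simp; omega
          · exact hposr p h
        · simp only [queSum, List.map_cons, List.sum_cons] at hSr ⊢
          omega
        · simp only [queSum, List.map_cons, List.sum_cons] at hSr ⊢
          omega
        · have hmul : cnt * (minute - t + 1) + (c - cnt) * (minute - t)
              = c * (minute - t) + cnt := by ring
          simp only [queSum, pot, List.map_cons, List.sum_cons] at hSr ⊢
          omega
    · have heq : serveA ((c, t) :: rest) cnt res minute = ((c, t) :: rest, cnt, res) := by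
        simp [serveA, hcnt]
      rw [heq]
      exact ⟨hpos, by simp [hcnt], by simp [hcnt], by simp [hcnt]⟩

lemma step_inv (cnt_by : Int) (arr : List Int) (m resA resB q : Int)
    (que : List (Int × Int)) (hpos : ∀ p ∈ que, 0 < p.1)
    (hres : resB = resA + pot m que) (hq : q = queSum que) :
    (∀ p ∈ (stepA cnt_by arr (resA, que) m).2, 0 < p.1) ∧
    (stepB cnt_by arr (resB, q) m).1
      = (stepA cnt_by arr (resA, que) m).1 + pot (m + 1) (stepA cnt_by arr (resA, que) m).2 ∧
    (stepB cnt_by arr (resB, q) m).2 = queSum (stepA cnt_by arr (resA, que) m).2 := by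
  obtain ⟨h1, h2, h3, h4⟩ := serveA_spec que cnt_by resA m hpos
  set r := serveA que cnt_by resA m with hr
  set s : Int := if 0 < cnt_by then min (queSum que) cnt_by else 0 with hs
  set current : Int := (PySem.List.pyGet? arr m).getD 0 with hcur
  have hsB : (if cnt_by > 0 then min q cnt_by else 0) = s := by
    rw [hq, hs]
  by_cases hb : current > cnt_by - s
  · have hbA : current > r.2.1 := by rw [h3]; exact hb
    have hAeq : stepA cnt_by arr (resA, que) m
        = (r.2.2 + r.2.1, r.1 ++ [(current - r.2.1, m)]) := by
      simp [stepA, ← hr, ← hcur, hbA]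
    have hBeq : stepB cnt_by arr (resB, q) m
        = (resB + q + current, q - s + (current - (cnt_by - s))) := by
      simp only [stepB, hsB, ← hcur, hb, if_pos]
    rw [hAeq, hBeq]
    refine ⟨?_, ?_, ?_⟩
    · intro p hp
      rcases List.mem_append.mp hp with h | h
      · exact h1 p h
      · simp only [List.mem_singleton] at h
        subst h
        simp only
        omega
    · simp only [pot_succ, pot_append]
      have : (current - r.2.1) * (m - m) = 0 := by ring
      rw [h3] at *
      omega
    · simp only [queSum_append]
      rw [h3] at *
      omega
  · have hbA : ¬ (current > r.2.1) := by rw [h3]; exact hb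
    have hAeq : stepA cnt_by arr (resA, que) m = (r.2.2 + current, r.1) := by
      simp [stepA, ← hr, ← hcur, hbA]
    have hBeq : stepB cnt_by arr (resB, q) m = (resB + q + current, q - s) := by
      simp only [stepB, hsB, ← hcur, hb, if_neg, not_false_iff]
    rw [hAeq, hBeq]
    refine ⟨h1, ?_, ?_⟩
    · show resB + q + current = r.2.2 + current + pot (m + 1) r.1
      rw [pot_succ]
      omega
    · show q - s = queSum r.1
      omega

lemma loop_inv (cnt_by : Int) (arr : List Int) (n : Nat) :
    ∀ (a resA resB q : Int) (que : List (Int × Int)), (∀ p ∈ que, 0 < p.1) →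
    resB = resA + pot a que → q = queSum que →
    (∀ p ∈ ((PySem.List.pyRange a (a + n) 1).foldl (stepA cnt_by arr) (resA, que)).2, 0 < p.1) ∧
    ((PySem.List.pyRange a (a + n) 1).foldl (stepB cnt_by arr) (resB, q)).1
      = ((PySem.List.pyRange a (a + n) 1).foldl (stepA cnt_by arr) (resA, que)).1
        + pot (a + n) ((PySem.List.pyRange a (a + n) 1).foldl (stepA cnt_by arr) (resA, que)).2 ∧
    ((PySem.List.pyRange a (a + n) 1).foldl (stepB cnt_by arr) (resB, q)).2
      = queSum ((PySem.List.pyRange a (a + n) 1).foldl (stepA cnt_by arr) (resA, que)).2 := by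
  induction n with
  | zero =>
    intro a resA resB q que hpos hres hq
    rw [show a + ((0 : Nat) : Int) = a by simp, PySem.List.pyRange_one_eq_nil (le_refl a)]
    exact ⟨hpos, by simpa using hres, hq⟩
  | succ n ih =>
    intro a resA resB q que hpos hres hq
    have hlt : a < a + ((n + 1 : Nat) : Int) := by push_cast; omega
    rw [PySem.List.pyRange_one_cons hlt]
    simp only [List.foldl_cons]
    obtain ⟨s1, s2, s3⟩ := step_inv cnt_by arr a resA resB q que hpos hres hq
    have hrw : a + ((n + 1 : Nat) : Int) = (a + 1) + (n : Int) := by push_cast; ring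
    rw [hrw]
    have := ih (a + 1) (stepA cnt_by arr (resA, que) a).1
      (stepB cnt_by arr (resB, q) a).1 (stepB cnt_by arr (resB, q) a).2
      (stepA cnt_by arr (resA, que) a).2 s1 s2 s3
    simpa using this

-- ===== VERDICT (by name: the statement is the Claim_ definition above) =====
theorem sum_time_in_pvz_spec : Claim_equal_sum_time_in_pvz := by
  intro minutes cnt_by arr _ _
  unfold Spec_sum_time_in_pvz sum_time_in_pvz sum_time_in_pvz_alt
  by_cases hm : 0 ≤ minutes
  · have L := loop_inv cnt_by arr minutes.toNat 0 0 0 0 []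
      (by simp) (by simp [pot]) (by simp [queSum])
    rw [show (0 : Int) + (minutes.toNat : Int) = minutes by omega] at L
    obtain ⟨l1, l2, l3⟩ := L
    rw [PySem.List.foldl_add, pot_final]
    dsimp only
    omega
  · rw [PySem.List.pyRange_one_eq_nil (by omega : minutes ≤ 0)]
    simp
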